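-- pv_equiv track=rewrite | github.com/FidelioC/A4-COMP4820 | de_bruijn.py | find_tip_indegree_zero
-- ===== SOURCE A (Python) =====
-- def find_nodes_indegree(graph):
--     init_nodes = {node: 0 for node in graph}  # start all nodes with indegree 0
--
--     for node, neighbours in graph.items():
--         for destination in neighbours:
--             if destination in init_nodes:
--                 init_nodes[destination] += 1
--
--     return init_nodes
--
-- def find_tip_indegree_zero(graph, nodes_indegree_zero, k):
--     """find indegree tips"""
--     tip_path = []  # might be used later
--     tip_nodes = []
--     all_nodes_indegree = find_nodes_indegree(graph)
--     for node in nodes_indegree_zero: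
--         tip_path = []
--         tip_path = find_tip_traverse_children(
--             graph, node, 1, k, tip_path, all_nodes_indegree
--         )
--         if tip_path:
--             tip_nodes.append(node)
--     return tip_nodes
--
-- def find_tip_traverse_children(graph, node, depth, k, path: list, all_nodes_indegree):
--     """check if node with in degree zero is a tip"""
--     path.append(node)
--
--     if depth >= k:
--         return False
--
--     children = list(graph.get(node, {}).keys())  # Get the children of the current node
--     for child in children:
--         if all_nodes_indegree[child] > 1:  # If a child has indegree > 1
--             path.append(child)
--             return path
--         # Recursively check the child's children
--         result = find_tip_traverse_children(
--             graph, child, depth + 1, k, path, all_nodes_indegree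
--         )
--         if result:
--             return result
--
--     return False
-- ===== SOURCE B (Python) =====
-- def _reaches_heavy(graph, indegree, root, k):
--     """Explicit-stack preorder DFS from root, cutting off at depth >= k."""
--     if k <= 1:
--         return False
--     stack = [(iter(graph.get(root, ())), 2)]  # root's children sit at depth 2
--     while stack:
--         children, depth = stack[-1]
--         child = next(children, None)
--         if child is None:
--             stack.pop()
--         elif indegree[child] > 1:
--             return True
--         elif depth < k:
--             stack.append((iter(graph.get(child, ())), depth + 1))
--     return False
--
--
-- def find_tip_indegree_zero(graph, nodes_indegree_zero, k):
--     """find indegree tips"""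
--     indegree = {node: 0 for node in graph}
--     for neighbours in graph.values():
--         for destination in neighbours:
--             if destination in indegree:
--                 indegree[destination] += 1
--     return [
--         node
--         for node in nodes_indegree_zero
--         if _reaches_heavy(graph, indegree, node, k)
--     ]
-- ===== Notes on version B (the rewrite author's own statement) =====
-- stated objective: alternative
-- what changed: The recursive tip-finder that threads and mutates a path list (returned only for its truthiness) is replaced by an iterative DFS with an explicit stack of (child-iterator, depth) frames returning a plain bool; it performs the same preorder walk, so it returns (and raises) exactly as A does.
-- outside the precondition, e.g. on find_tip_indegree_zero({'a': {'h': 1, 'z': 1}, 'b': {'h': 1}, 'h': {}}, ['a'], 2): A returns ['a'], B returns ['a']; on find_tip_indegree_zero({'a': {'a': 1}}, ['a'], 950): A returns [], B returns []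
import Mathlib
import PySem

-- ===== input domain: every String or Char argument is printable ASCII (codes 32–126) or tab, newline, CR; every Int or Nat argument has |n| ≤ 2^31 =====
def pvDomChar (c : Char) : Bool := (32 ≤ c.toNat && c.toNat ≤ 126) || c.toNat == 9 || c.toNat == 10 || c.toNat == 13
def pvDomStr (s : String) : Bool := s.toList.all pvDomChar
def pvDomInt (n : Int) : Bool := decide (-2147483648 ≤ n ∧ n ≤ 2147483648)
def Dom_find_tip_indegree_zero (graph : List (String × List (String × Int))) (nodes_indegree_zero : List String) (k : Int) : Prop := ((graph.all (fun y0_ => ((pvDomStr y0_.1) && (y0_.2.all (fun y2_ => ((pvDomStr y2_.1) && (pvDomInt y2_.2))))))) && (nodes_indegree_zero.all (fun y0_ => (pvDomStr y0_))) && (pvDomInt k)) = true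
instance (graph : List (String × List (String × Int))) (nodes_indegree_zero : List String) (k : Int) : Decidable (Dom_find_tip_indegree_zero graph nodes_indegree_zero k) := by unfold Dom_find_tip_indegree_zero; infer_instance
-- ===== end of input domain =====

-- B replaces A's recursive preorder DFS (mutated path list, early return, one recursive helper
-- call per node) by an explicit-stack iterative DFS that keeps only (child-iterator, depth)
-- frames and a Bool, dropping the path list whose only use is its truthiness; same preorder,
-- so B returns (and raises) exactly as A does (A mutates no argument).

-- `list(graph.get(node, {}).keys())` in A / `graph.get(node, ())` iterated over its keys in B
def childrenOf (graph : List (String × List (String × Int))) (node : String) : List String :=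
  ((PySem.Dict.mk graph).getD node []).map Prod.fst

-- ===== PORT A =====
def find_nodes_indegree (graph : List (String × List (String × Int))) : PySem.Dict String Int :=
  let init_nodes := graph.foldl (fun d p => d.insert p.1 0) PySem.Dict.empty
  graph.foldl
    (fun d p => p.2.foldl (fun d q => if d.contains q.1 then d.modify q.1 0 (· + 1) else d) d)
    init_nodes

-- Python truthiness of `tip_path` / `result`: False → false, a list → nonempty
def pyTruthy : Option (List String) → Bool
  | none => false
  | some p => !p.isEmpty

-- find_tip_traverse_children: first component = the mutated `path` list (path.append(node) done
-- once on entry, written here as `path ++ [node]` at each use), second = the returned value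
-- (Python's False = none). `all_nodes_indegree[child]` is ported as getD … 0: Python raises
-- KeyError on a missing child; Pre_ excludes every input on which that lookup may be reached, so
-- getD is exact there.
mutual
def find_tip_traverse_children (graph : List (String × List (String × Int)))
    (alln : PySem.Dict String Int) (k : Int) (node : String) (depth : Int)
    (path : List String) : List String × Option (List String) :=
  if h : depth ≥ k then (path ++ [node], none)
  else traverse_children_loop graph alln k (childrenOf graph node) depth (path ++ [node])
    (lt_of_not_ge h)
  termination_by ((k - depth).toNat, 1, 0)
  decreasing_by apply Prod.Lex.right; apply Prod.Lex.left; omega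

def traverse_children_loop (graph : List (String × List (String × Int)))
    (alln : PySem.Dict String Int) (k : Int) (children : List String) (depth : Int)
    (path : List String) (h : depth < k) : List String × Option (List String) :=
  match children with
  | [] => (path, none)
  | child :: rest =>
    if 1 < PySem.Dict.getD alln child 0 then (path ++ [child], some (path ++ [child]))
    else
      let result := find_tip_traverse_children graph alln k child (depth + 1) path
      if pyTruthy result.2 then result
      else traverse_children_loop graph alln k rest depth result.1 h
  termination_by ((k - depth).toNat, 0, children.length + 1)
  decreasing_by
    · apply Prod.Lex.left; omega
    · apply Prod.Lex.right; apply Prod.Lex.right; simp only [List.length_cons]; omega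
end

def find_tip_indegree_zero (graph : List (String × List (String × Int))) (nodes_indegree_zero : List String) (k : Int) : List String :=
  let all_nodes_indegree := find_nodes_indegree graph
  nodes_indegree_zero.foldl
    (fun tip_nodes node =>
      if pyTruthy (find_tip_traverse_children graph all_nodes_indegree k node 1 []).2
      then tip_nodes ++ [node] else tip_nodes)
    []

-- ===== PORT B =====
def altIndegree (graph : List (String × List (String × Int))) : PySem.Dict String Int :=
  let indegree := (graph.map Prod.fst).foldl (fun d node => d.insert node 0) PySem.Dict.empty
  (graph.map Prod.snd).foldl
    (fun d neighbours =>
      neighbours.foldl (fun d q => if d.contains q.1 then d.modify q.1 0 (· + 1) else d) d)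
    indegree

-- largest adjacency-list length of the graph (only used to bound the fuel of the loop below)
def maxAdj (graph : List (String × List (String × Int))) : Nat :=
  (graph.map (fun p => p.2.length)).foldr max 0

-- fuel bound for the explicit stack: each frame (cs, d) weighs 1 + |cs|·(M+2)^(k-d); every loop
-- step strictly decreases it (proved below the claim block), so the fuel guard never fires
def stackWeight (k : Int) (M : Nat) (stack : List (List String × Int)) : Nat :=
  (stack.map (fun f => 1 + f.1.length * (M + 2) ^ ((k - f.2).toNat))).sum

-- B's while loop: stack of (remaining-children, depth-of-those-children) frames; the structural
-- fuel argument is a totality guard only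
def reachesHeavyLoop (graph : List (String × List (String × Int)))
    (indeg : PySem.Dict String Int) (k : Int) : Nat → List (List String × Int) → Bool
  | _, [] => false
  | 0, _ :: _ => false
  | fuel + 1, ([], _) :: rest => reachesHeavyLoop graph indeg k fuel rest
  | fuel + 1, (child :: cs, depth) :: rest =>
    if 1 < PySem.Dict.getD indeg child 0 then true
    else if depth < k then
      reachesHeavyLoop graph indeg k fuel
        ((childrenOf graph child, depth + 1) :: (cs, depth) :: rest)
    else reachesHeavyLoop graph indeg k fuel ((cs, depth) :: rest)

def reachesHeavy (graph : List (String × List (String × Int)))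
    (indeg : PySem.Dict String Int) (root : String) (k : Int) : Bool :=
  if k ≤ 1 then false
  else reachesHeavyLoop graph indeg k
    (stackWeight k (maxAdj graph) [(childrenOf graph root, 2)]) [(childrenOf graph root, 2)]

def find_tip_indegree_zero_alt (graph : List (String × List (String × Int))) (nodes_indegree_zero : List String) (k : Int) : List String :=
  let indegree := altIndegree graph
  nodes_indegree_zero.filter (fun node => reachesHeavy graph indegree node k)

-- ===== PRECONDITION & SPEC =====
-- nodes reachable from `s` in at most `t` edge steps (bounded saturation of the child relation)
def reachIter (graph : List (String × List (String × Int))) : Nat → List String → List String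
  | 0, s => s
  | t + 1, s => reachIter graph t (PySem.Set.update s (s.flatMap (childrenOf graph)))

-- Pre_ excludes (a) graphs in which the traversal could reach, within depth k, a child that is not
-- a key of graph — there Python A in general raises KeyError, and Python B, which performs the
-- same preorder walk, raises identically; on the few excluded inputs where A still returns (a
-- heavy child found before any dangling lookup) B returns the identical value, and they are
-- excluded only because the total Lean ports replace the raising lookup by getD … 0 — and
-- (b) k > 900 together with a cycle reachable from the listed roots, where A's recursion depth is
-- bounded only by k and can exceed Python's recursion limit (RecursionError; B's explicit stack
-- returns there).
def Pre_find_tip_indegree_zero (graph : List (String × List (String × Int))) (nodes_indegree_zero : List String) (k : Int) : Prop :=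
  k ≤ 1 ∨
  ((∀ v ∈ reachIter graph (min (k - 2).toNat (graph.length + 1)) (PySem.Set.ofList nodes_indegree_zero),
      ∀ c ∈ childrenOf graph v, c ∈ graph.map Prod.fst)
   ∧ (k ≤ 900 ∨
      ∀ v ∈ reachIter graph (graph.length + 1) (PySem.Set.ofList nodes_indegree_zero),
        v ∉ reachIter graph (graph.length + 1) (childrenOf graph v)))
instance (graph : List (String × List (String × Int))) (nodes_indegree_zero : List String) (k : Int) : Decidable (Pre_find_tip_indegree_zero graph nodes_indegree_zero k) := by unfold Pre_find_tip_indegree_zero; infer_instance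

def pvWitness_find_tip_indegree_zero : (List (String × List (String × Int))) × List String × Int :=
  ([("a", [("b", 1)]), ("b", [])], ["a"], 3)

def Spec_find_tip_indegree_zero (graph : List (String × List (String × Int))) (nodes_indegree_zero : List String) (k : Int) (out : List String) : Prop := out = find_tip_indegree_zero_alt graph nodes_indegree_zero k
instance (graph : List (String × List (String × Int))) (nodes_indegree_zero : List String) (k : Int) (out : List String) : Decidable (Spec_find_tip_indegree_zero graph nodes_indegree_zero k out) := by unfold Spec_find_tip_indegree_zero; infer_instance

-- ===== CLAIM (what is proved, stated in full; the proofs are below) =====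
def Claim_equal_find_tip_indegree_zero : Prop := ∀ (graph : List (String × List (String × Int))) (nodes_indegree_zero : List String) (k : Int), Dom_find_tip_indegree_zero graph nodes_indegree_zero k → Pre_find_tip_indegree_zero graph nodes_indegree_zero k → Spec_find_tip_indegree_zero graph nodes_indegree_zero k (find_tip_indegree_zero graph nodes_indegree_zero k)

-- ===== LEMMAS AND PROOFS =====

-- the two indegree computations are the same fold
lemma altIndegree_eq (graph : List (String × List (String × Int))) :
    altIndegree graph = find_nodes_indegree graph := by
  simp [altIndegree, find_nodes_indegree, List.foldl_map]

-- `lvl m c`: m = 0 says c itself has indegree > 1; m + 1 says some child of c satisfies lvl m —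
-- i.e. lvl m c = "some walk of exactly m steps from c ends at a node of indegree > 1"
def lvl (graph : List (String × List (String × Int))) (indeg : PySem.Dict String Int) :
    Nat → String → Bool
  | 0, c => 1 < PySem.Dict.getD indeg c 0
  | m + 1, c => (childrenOf graph c).any (lvl graph indeg m)

lemma lvl_succ (graph : List (String × List (String × Int))) (indeg : PySem.Dict String Int)
    (m : Nat) (c : String) :
    lvl graph indeg (m + 1) c = (childrenOf graph c).any (lvl graph indeg m) := by
  simp [lvl]

-- what A's DFS from `node` at `depth` reports, as a depth-indexed existence statement
def FoundSpec (graph : List (String × List (String × Int))) (indeg : PySem.Dict String Int)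
    (k : Int) (node : String) (depth : Int) : Prop :=
  ∃ m : Nat, depth + (m : Int) < k ∧ lvl graph indeg (m + 1) node = true

lemma traverse_children_loop_char (graph : List (String × List (String × Int)))
    (alln : PySem.Dict String Int) (k : Int) (t : Nat)
    (IH : ∀ n d p, (k - d).toNat ≤ t →
      (pyTruthy (find_tip_traverse_children graph alln k n d p).2 = true ↔
        FoundSpec graph alln k n d)) :
    ∀ (children : List String) (d : Int) (p : List String) (h : d < k),
      (k - (d + 1)).toNat ≤ t →
      (pyTruthy (traverse_children_loop graph alln k children d p h).2 = true ↔
        ∃ c ∈ children, (1 < PySem.Dict.getD alln c 0) ∨ FoundSpec graph alln k c (d + 1)) := by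
  intro children
  induction children with
  | nil =>
    intro d p h ht
    rw [traverse_children_loop.eq_def]
    simp [pyTruthy]
  | cons child rest ih =>
    intro d p h ht
    rw [traverse_children_loop.eq_def]
    by_cases hh : 1 < PySem.Dict.getD alln child 0
    · simp only [hh, if_true]
      simp only [pyTruthy, List.exists_mem_cons_iff]
      constructor
      · intro _; left; left; exact hh
      · intro _; simp
    · simp only [hh, if_false]
      by_cases hf : pyTruthy (find_tip_traverse_children graph alln k child (d + 1) p).2 = true
      · simp only [hf, if_true]
        rw [List.exists_mem_cons_iff]
        constructor
        · intro _; left; right; exact (IH child (d + 1) p ht).mp hf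
        · intro _; trivial
      · simp only [Bool.not_eq_true] at hf
        simp only [hf, Bool.false_eq_true, if_false]
        rw [ih d _ h ht]
        rw [List.exists_mem_cons_iff]
        have hfound : ¬ FoundSpec graph alln k child (d + 1) := by
          intro hc
          rw [← IH child (d + 1) p ht] at hc
          simp [hf] at hc
        constructor
        · intro hr; right; exact hr
        · rintro (hc | hr)
          · rcases hc with hc | hc
            · exact absurd hc hh
            · exact absurd hc hfound
          · exact hr

lemma find_tip_traverse_children_char (graph : List (String × List (String × Int)))
    (alln : PySem.Dict String Int) (k : Int) :
    ∀ (t : Nat) (n : String) (d : Int) (p : List String), (k - d).toNat ≤ t →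
      (pyTruthy (find_tip_traverse_children graph alln k n d p).2 = true ↔
        FoundSpec graph alln k n d) := by
  intro t
  induction t with
  | zero =>
    intro n d p ht
    rw [find_tip_traverse_children.eq_def, dif_pos (by omega : d ≥ k)]
    simp only [pyTruthy, Bool.false_eq_true, false_iff]
    rintro ⟨m, hm, _⟩
    omega
  | succ t iht =>
    intro n d p ht
    rw [find_tip_traverse_children.eq_def]
    by_cases hdk : d ≥ k
    · rw [dif_pos hdk]
      simp only [pyTruthy, Bool.false_eq_true, false_iff]
      rintro ⟨m, hm, _⟩
      omega
    · rw [dif_neg hdk]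
      have hd : d < k := lt_of_not_ge hdk
      rw [traverse_children_loop_char graph alln k t (fun n' d' p' h' => iht n' d' p' h')
        (childrenOf graph n) d (p ++ [n]) (lt_of_not_ge hdk) (by omega)]
      constructor
      · rintro ⟨c, hc, hcase⟩
        rcases hcase with hheavy | ⟨m, hm, hlvl⟩
        · refine ⟨0, by omega, ?_⟩
          rw [lvl_succ, List.any_eq_true]
          exact ⟨c, hc, decide_eq_true hheavy⟩
        · refine ⟨m + 1, by push_cast at hm ⊢; omega, ?_⟩
          rw [lvl_succ, List.any_eq_true]
          exact ⟨c, hc, hlvl⟩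
      · rintro ⟨m, hm, hlvl⟩
        rw [lvl_succ, List.any_eq_true] at hlvl
        rcases hlvl with ⟨c, hc, hlvlc⟩
        refine ⟨c, hc, ?_⟩
        cases m with
        | zero => left; exact of_decide_eq_true hlvlc
        | succ m' => right; exact ⟨m', by push_cast at hm ⊢; omega, hlvlc⟩

-- what B's stack machine reports about one pending child c at depth d
def HitB (graph : List (String × List (String × Int))) (indeg : PySem.Dict String Int)
    (k : Int) (c : String) (d : Int) : Prop :=
  ∃ m : Nat, (m = 0 ∨ d + (m : Int) ≤ k) ∧ lvl graph indeg m c = true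

lemma hitB_expand (graph : List (String × List (String × Int))) (indeg : PySem.Dict String Int)
    (k : Int) (child : String) (depth : Int)
    (hh : ¬ 1 < PySem.Dict.getD indeg child 0) (hd : depth < k) :
    HitB graph indeg k child depth ↔
      ∃ c' ∈ childrenOf graph child, HitB graph indeg k c' (depth + 1) := by
  constructor
  · rintro ⟨m, hm, hl⟩
    cases m with
    | zero => exact absurd (of_decide_eq_true hl) hh
    | succ m' =>
      rw [lvl_succ, List.any_eq_true] at hl
      rcases hl with ⟨c', hc', hlc'⟩
      refine ⟨c', hc', m', ?_, hlc'⟩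
      cases m' with
      | zero => left; rfl
      | succ mm =>
        right
        rcases hm with hm | hm
        · omega
        · push_cast at hm ⊢; omega
  · rintro ⟨c', hc', m', hm', hl'⟩
    refine ⟨m' + 1, ?_, ?_⟩
    · right
      rcases hm' with hm' | hm'
      · subst hm'; push_cast; omega
      · push_cast at hm' ⊢; omega
    · rw [lvl_succ, List.any_eq_true]
      exact ⟨c', hc', hl'⟩

lemma hitB_dead (graph : List (String × List (String × Int))) (indeg : PySem.Dict String Int)
    (k : Int) (child : String) (depth : Int)
    (hh : ¬ 1 < PySem.Dict.getD indeg child 0) (hd : ¬ depth < k) :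
    ¬ HitB graph indeg k child depth := by
  rintro ⟨m, hm, hl⟩
  cases m with
  | zero => exact absurd (of_decide_eq_true hl) hh
  | succ m' =>
    rcases hm with hm | hm
    · omega
    · push_cast at hm; omega

lemma getD_len_le_maxAdj (graph : List (String × List (String × Int))) (n : String) :
    ((PySem.Dict.mk graph).getD n []).length ≤ maxAdj graph := by
  unfold maxAdj
  induction graph with
  | nil => simp [PySem.Dict.getD, PySem.Dict.get?]
  | cons p rest ih =>
    rw [PySem.Dict.getD, PySem.Dict.get?_mk_cons]
    rw [PySem.Dict.getD] at ih
    by_cases h : p.1 == n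
    · simp [h]
    · simp only [h]
      simp only [List.map_cons, List.foldr_cons]
      exact le_trans ih (le_max_right _ _)

lemma altChildren_len (graph : List (String × List (String × Int))) (n : String) :
    (childrenOf graph n).length ≤ maxAdj graph := by
  simpa [childrenOf] using getD_len_le_maxAdj graph n

-- the three loop steps strictly decrease the weight, so the fuel guard is never reached
lemma pvStep_pop (k : Int) (M : Nat) (d : Int) (rest : List (List String × Int)) :
    stackWeight k M rest < stackWeight k M (([], d) :: rest) := by
  simp only [stackWeight, List.map_cons, List.sum_cons, List.length_nil, Nat.zero_mul]
  omega

lemma pvStep_push (graph : List (String × List (String × Int))) (k : Int) (child : String)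
    (cs : List String) (depth : Int) (rest : List (List String × Int)) (hd : depth < k) :
    stackWeight k (maxAdj graph) ((childrenOf graph child, depth + 1) :: (cs, depth) :: rest)
      < stackWeight k (maxAdj graph) ((child :: cs, depth) :: rest) := by
  simp only [stackWeight, List.map_cons, List.sum_cons, List.length_cons]
  have ht : (k - (depth + 1)).toNat = (k - depth).toNat - 1 := by omega
  rw [ht]
  have hp : 1 ≤ (maxAdj graph + 2) ^ ((k - depth).toNat - 1) := Nat.one_le_pow _ _ (by omega)
  have hP : (maxAdj graph + 2) ^ ((k - depth).toNat)
      = (maxAdj graph + 2) * (maxAdj graph + 2) ^ ((k - depth).toNat - 1) := by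
    conv_lhs => rw [show (k - depth).toNat = ((k - depth).toNat - 1) + 1 by omega]
    rw [pow_succ']
  have hX : (maxAdj graph + 2) * (maxAdj graph + 2) ^ ((k - depth).toNat - 1)
      = maxAdj graph * (maxAdj graph + 2) ^ ((k - depth).toNat - 1)
        + 2 * (maxAdj graph + 2) ^ ((k - depth).toNat - 1) :=
    Nat.add_mul _ _ _
  have htwo : 2 * (maxAdj graph + 2) ^ ((k - depth).toNat - 1)
      = (maxAdj graph + 2) ^ ((k - depth).toNat - 1)
        + (maxAdj graph + 2) ^ ((k - depth).toNat - 1) := Nat.two_mul _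
  have hML : (childrenOf graph child).length * (maxAdj graph + 2) ^ ((k - depth).toNat - 1)
      ≤ maxAdj graph * (maxAdj graph + 2) ^ ((k - depth).toNat - 1) :=
    Nat.mul_le_mul (altChildren_len graph child) (Nat.le_refl _)
  have hsum : (cs.length + 1) * ((maxAdj graph + 2) ^ ((k - depth).toNat))
      = cs.length * ((maxAdj graph + 2) ^ ((k - depth).toNat))
        + (maxAdj graph + 2) ^ ((k - depth).toNat) := Nat.succ_mul _ _
  omega

lemma pvStep_skip (k : Int) (M : Nat) (child : String) (cs : List String) (depth : Int)
    (rest : List (List String × Int)) :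
    stackWeight k M ((cs, depth) :: rest) < stackWeight k M ((child :: cs, depth) :: rest) := by
  simp only [stackWeight, List.map_cons, List.sum_cons, List.length_cons]
  have hp : 1 ≤ (M + 2) ^ ((k - depth).toNat) := Nat.one_le_pow _ _ (by omega)
  have hsum : (cs.length + 1) * (M + 2) ^ ((k - depth).toNat)
      = cs.length * (M + 2) ^ ((k - depth).toNat) + (M + 2) ^ ((k - depth).toNat) :=
    Nat.succ_mul _ _
  omega

lemma reachesHeavyLoop_char (graph : List (String × List (String × Int)))
    (indeg : PySem.Dict String Int) (k : Int) :
    ∀ (fuel : Nat) (stack : List (List String × Int)),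
      stackWeight k (maxAdj graph) stack ≤ fuel →
      (reachesHeavyLoop graph indeg k fuel stack = true ↔
        ∃ f ∈ stack, ∃ c ∈ f.1, HitB graph indeg k c f.2) := by
  intro fuel
  induction fuel with
  | zero =>
    intro stack h
    cases stack with
    | nil => simp [reachesHeavyLoop]
    | cons f rest =>
      exfalso
      simp only [stackWeight, List.map_cons, List.sum_cons] at h
      omega
  | succ fuel ih =>
    intro stack h
    match stack with
    | [] => simp [reachesHeavyLoop]
    | ([], d) :: rest =>
      rw [reachesHeavyLoop]
      rw [ih rest (by have := pvStep_pop k (maxAdj graph) d rest; omega)]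
      simp
    | (child :: cs, depth) :: rest =>
      rw [reachesHeavyLoop]
      by_cases hh : 1 < PySem.Dict.getD indeg child 0
      · simp only [hh, if_true, true_iff]
        exact ⟨(child :: cs, depth), List.mem_cons_self, child, List.mem_cons_self,
          0, Or.inl rfl, decide_eq_true hh⟩
      · simp only [hh, if_false]
        by_cases hd : depth < k
        · simp only [hd, if_true]
          rw [ih ((childrenOf graph child, depth + 1) :: (cs, depth) :: rest)
            (by have := pvStep_push graph k child cs depth rest hd; omega)]
          simp only [List.exists_mem_cons_iff]
          rw [hitB_expand graph indeg k child depth hh hd]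
          exact or_assoc.symm
        · simp only [hd, if_false]
          rw [ih ((cs, depth) :: rest)
            (by have := pvStep_skip k (maxAdj graph) child cs depth rest; omega)]
          simp only [List.exists_mem_cons_iff]
          have hdead := hitB_dead graph indeg k child depth hh hd
          simp [hdead]

lemma root_cond_eq (graph : List (String × List (String × Int)))
    (alln : PySem.Dict String Int) (k : Int) (n : String) :
    pyTruthy (find_tip_traverse_children graph alln k n 1 []).2 =
      reachesHeavy graph alln n k := by
  rw [Bool.eq_iff_iff]
  rw [find_tip_traverse_children_char graph alln k (k - 1).toNat n 1 [] le_rfl]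
  unfold reachesHeavy
  by_cases hk : k ≤ 1
  · simp only [hk, if_true, Bool.false_eq_true, iff_false]
    rintro ⟨m, hm, _⟩
    omega
  · simp only [hk, if_false]
    rw [reachesHeavyLoop_char graph alln k _ _ (le_refl _)]
    simp only [List.exists_mem_cons_iff, List.not_mem_nil, false_and, exists_false, or_false]
    unfold FoundSpec HitB
    constructor
    · rintro ⟨m, hm, hl⟩
      rw [lvl_succ, List.any_eq_true] at hl
      rcases hl with ⟨c, hc, hlc⟩
      exact ⟨c, hc, m, by omega, hlc⟩
    · rintro ⟨c, hc, m, hm, hl⟩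
      refine ⟨m, by omega, ?_⟩
      rw [lvl_succ, List.any_eq_true]
      exact ⟨c, hc, hl⟩

-- ===== VERDICT (by name: the statement is the Claim_ definition above) =====
theorem find_tip_indegree_zero_spec : Claim_equal_find_tip_indegree_zero := by
  intro graph nodes_indegree_zero k _ _
  unfold Spec_find_tip_indegree_zero
  simp only [find_tip_indegree_zero, find_tip_indegree_zero_alt, altIndegree_eq]
  simp only [root_cond_eq]
  rw [PySem.List.foldl_append_if_eq_filter]
  simp
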